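-- pv_equiv track=rewrite | github.com/klynvan/ITSC-3155-Intermediate-Python-Exercises-1 | exercises_12.py | get_combined_dict
-- ===== SOURCE A (Python) =====
-- def get_combined_dict(dict1, dict2):
--     new_dict = {}
--     value = 0
--     for i in dict1:
--         for j in dict2:
--             if i == j:
--                 value = dict1[i] + dict2[j]
--                 # adds the value from both dictionary
--                 new_dict.update({i: value})
--                 # updates the dictionary with the elements from another dictionary object
--                 # https://www.geeksforgeeks.org/python-dictionary-update-method/
--     return new_dict
-- ===== SOURCE B (Python) =====
-- def get_combined_dict(dict1, dict2):
--     # single pass over dict1's items with a direct dict2 lookup;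
--     # the nested scan over dict2 disappears
--     return {k: v + dict2[k] for k, v in dict1.items() if k in dict2}
-- ===== Notes on version B (the rewrite author's own statement) =====
-- stated objective: faster
-- what changed: Replaces the nested loop over all key pairs (with repeated dict1[i]/dict2[j] lookups) by a single dict comprehension over dict1's items with one direct dict2 lookup per key, so the inner scan over dict2 disappears.
import Mathlib
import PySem

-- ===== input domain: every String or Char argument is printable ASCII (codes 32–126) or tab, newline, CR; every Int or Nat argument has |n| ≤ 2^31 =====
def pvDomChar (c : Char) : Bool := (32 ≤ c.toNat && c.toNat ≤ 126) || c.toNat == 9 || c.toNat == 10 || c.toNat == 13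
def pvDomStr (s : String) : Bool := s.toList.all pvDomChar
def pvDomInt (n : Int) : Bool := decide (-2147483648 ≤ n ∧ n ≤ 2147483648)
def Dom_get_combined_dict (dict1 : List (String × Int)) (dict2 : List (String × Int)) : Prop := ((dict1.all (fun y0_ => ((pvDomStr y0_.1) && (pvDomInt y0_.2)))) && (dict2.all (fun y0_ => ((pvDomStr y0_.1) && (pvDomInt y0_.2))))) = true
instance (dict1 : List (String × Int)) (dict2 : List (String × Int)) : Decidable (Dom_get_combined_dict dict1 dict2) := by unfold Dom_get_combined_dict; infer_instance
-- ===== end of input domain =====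

-- B replaces A's nested key-pair scan by a single pass over dict1's items with a direct dict2 lookup (asymptotically faster).


-- ===== PORT A =====
-- for i in dict1: for j in dict2: if i == j: new_dict.update({i: dict1[i] + dict2[j]})
def get_combined_dict (dict1 : List (String × Int)) (dict2 : List (String × Int)) : List (String × Int) :=
  ((PySem.Dict.mk dict1).keys.foldl (fun new_dict i =>
      (PySem.Dict.mk dict2).keys.foldl (fun new_dict j =>
        if i == j then
          new_dict.insert i ((PySem.Dict.mk dict1).getD i 0 + (PySem.Dict.mk dict2).getD j 0)
        else new_dict) new_dict)
    PySem.Dict.empty).items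

-- ===== PORT B =====
-- {k: v + dict2[k] for k, v in dict1.items() if k in dict2}
def get_combined_dict_alt (dict1 : List (String × Int)) (dict2 : List (String × Int)) : List (String × Int) :=
  dict1.filterMap (fun kv => ((PySem.Dict.mk dict2).get? kv.1).map (fun w => (kv.1, kv.2 + w)))

-- ===== PRECONDITION & SPEC =====
-- Pre_ excludes association lists with duplicate keys: a Python dict can never contain
-- a duplicate key, so such lists do not encode any input A actually receives.
def Pre_get_combined_dict (dict1 : List (String × Int)) (dict2 : List (String × Int)) : Prop :=
  (dict1.map Prod.fst).Nodup ∧ (dict2.map Prod.fst).Nodup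
instance (dict1 : List (String × Int)) (dict2 : List (String × Int)) : Decidable (Pre_get_combined_dict dict1 dict2) := by unfold Pre_get_combined_dict; infer_instance

def pvWitness_get_combined_dict : (List (String × Int)) × (List (String × Int)) :=
  ([("a", 1), ("b", 2), ("c", 3)], [("b", 10), ("a", 5)])

def Spec_get_combined_dict (dict1 : List (String × Int)) (dict2 : List (String × Int)) (out : List (String × Int)) : Prop := out = get_combined_dict_alt dict1 dict2
instance (dict1 : List (String × Int)) (dict2 : List (String × Int)) (out : List (String × Int)) : Decidable (Spec_get_combined_dict dict1 dict2 out) := by unfold Spec_get_combined_dict; infer_instance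

-- ===== CLAIM (what is proved, stated in full; the proofs are below) =====
def Claim_equal_get_combined_dict : Prop := ∀ (dict1 : List (String × Int)) (dict2 : List (String × Int)), Dom_get_combined_dict dict1 dict2 → Pre_get_combined_dict dict1 dict2 → Spec_get_combined_dict dict1 dict2 (get_combined_dict dict1 dict2)

-- ===== LEMMAS AND PROOFS =====

-- Inner loop of A: scanning dict2's keys for a match of i and inserting at each match
-- collapses to a single conditional insert (re-insertion of the same key/value is idempotent).
theorem pv_inner (ks2 : List String) (i : String) (f : String → Int)
    (nd : PySem.Dict String Int) :
    ks2.foldl (fun nd j => if i == j then nd.insert i (f j) else nd) nd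
      = if i ∈ ks2 then nd.insert i (f i) else nd := by
  induction ks2 generalizing nd with
  | nil => simp
  | cons j js ih =>
    by_cases h : i = j
    · subst h
      simp only [List.foldl_cons, BEq.rfl, if_true, ih, List.mem_cons, true_or, if_true]
      split <;> simp [PySem.Dict.insert_insert_self]
    · have hb : (i == j) = false := by simp [h]
      rw [List.foldl_cons]
      simp only [hb, Bool.false_eq_true, if_false]
      rw [ih]
      simp [h]

-- Outer loop of A over distinct keys none of which is in the accumulator: appends one
-- item per shared key, i.e. the accumulator's items followed by a filterMap.
theorem pv_outer (ks1 : List String) (ks2 : List String) (f : String → Int)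
    (nd : PySem.Dict String Int) (hnd : ks1.Nodup)
    (hfresh : ∀ i ∈ ks1, nd.contains i = false) :
    (ks1.foldl (fun nd i => if i ∈ ks2 then nd.insert i (f i) else nd) nd).items
      = nd.items ++ ks1.filterMap (fun i => if i ∈ ks2 then some (i, f i) else none) := by
  induction ks1 generalizing nd with
  | nil => simp
  | cons i is ih =>
    rcases List.nodup_cons.mp hnd with ⟨hni, hnod⟩
    by_cases hi : i ∈ ks2
    · have hc : nd.contains i = false := hfresh i (List.mem_cons_self ..)
      have hfresh' : ∀ x ∈ is, (nd.insert i (f i)).contains x = false := by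
        intro x hx
        rw [PySem.Dict.contains_insert]
        have : (x == i) = false := by
          simp only [beq_eq_false_iff_ne]; rintro rfl; exact hni hx
        simp [this, hfresh x (List.mem_cons_of_mem _ hx)]
      simp only [List.foldl_cons, hi, if_true, List.filterMap_cons]
      rw [ih _ hnod hfresh', PySem.Dict.items_insert_of_not_contains _ _ hc]
      simp
    · simp only [List.foldl_cons, hi, if_false, List.filterMap_cons]
      rw [ih _ hnod (fun x hx => hfresh x (List.mem_cons_of_mem _ hx))]

-- ===== VERDICT (by name: the statement is the Claim_ definition above) =====
theorem get_combined_dict_spec : Claim_equal_get_combined_dict := by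
  intro dict1 dict2 _ hpre
  unfold Spec_get_combined_dict get_combined_dict get_combined_dict_alt
  obtain ⟨h1, h2⟩ := hpre
  have hk1 : (PySem.Dict.mk dict1).keys = dict1.map Prod.fst := rfl
  have hk2 : (PySem.Dict.mk dict2).keys = dict2.map Prod.fst := rfl
  -- rewrite each inner fold using pv_inner
  have hinner : ∀ nd : PySem.Dict String Int, (PySem.Dict.mk dict1).keys.foldl (fun new_dict i =>
        (PySem.Dict.mk dict2).keys.foldl (fun new_dict j =>
          if i == j then new_dict.insert i ((PySem.Dict.mk dict1).getD i 0 + (PySem.Dict.mk dict2).getD j 0)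
          else new_dict) new_dict) nd
      = (PySem.Dict.mk dict1).keys.foldl (fun new_dict i =>
          if i ∈ (PySem.Dict.mk dict2).keys then
            new_dict.insert i ((PySem.Dict.mk dict1).getD i 0 + (PySem.Dict.mk dict2).getD i 0)
          else new_dict) nd := by
    intro nd
    have hfun : (fun (new_dict : PySem.Dict String Int) i =>
        (PySem.Dict.mk dict2).keys.foldl (fun new_dict j =>
          if i == j then new_dict.insert i ((PySem.Dict.mk dict1).getD i 0 + (PySem.Dict.mk dict2).getD j 0)
          else new_dict) new_dict)
        = (fun (new_dict : PySem.Dict String Int) i =>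
          if i ∈ (PySem.Dict.mk dict2).keys then
            new_dict.insert i ((PySem.Dict.mk dict1).getD i 0 + (PySem.Dict.mk dict2).getD i 0)
          else new_dict) := by
      funext nd' i
      exact pv_inner _ _ _ _
    rw [hfun]
  simp only [hinner]
  rw [pv_outer _ _ _ _ (by simpa [hk1] using h1) (by simp [PySem.Dict.contains_empty])]
  simp only [hk1, hk2, List.filterMap_map]
  apply List.filterMap_congr
  intro kv hkv
  have hget1 : (PySem.Dict.mk dict1).getD kv.1 0 = kv.2 :=
    PySem.Dict.getD_of_mem_items _ hkv (by simpa [hk1] using h1) 0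
  by_cases hm : kv.1 ∈ dict2.map Prod.fst
  · have hcon : (PySem.Dict.mk dict2).contains kv.1 = true := by
      rw [PySem.Dict.contains_iff_mem_keys]; simpa [hk2] using hm
    have hsome : ((PySem.Dict.mk dict2 : PySem.Dict String Int).get? kv.1).isSome = true := by
      rw [← PySem.Dict.contains_eq_isSome_get?]; exact hcon
    rcases Option.isSome_iff_exists.mp hsome with ⟨w, hw⟩
    have hg2 : (PySem.Dict.mk dict2).getD kv.1 0 = w :=
      PySem.Dict.getD_of_get?_eq_some _ 0 hw
    simp [Function.comp, hm, hw, hget1, hg2, add_comm]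
  · have hnone : (PySem.Dict.mk dict2).get? kv.1 = none := by
      rw [PySem.Dict.get?_eq_none_iff_not_mem_keys]; simpa [hk2] using hm
    simp [Function.comp, hm, hnone]
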